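-- pv_equiv track=rewrite | github.com/ann3tte/phi-redactor | reidentifier.py | convert_starred_to_placeholders
-- ===== SOURCE A (Python) =====
-- def convert_starred_to_placeholders(text, mapping):
--     new_text = text
--     label_lookup = {}
--     for key in mapping:
--         label = key.split("#")[0].strip("_")
--         label_lookup.setdefault(label, []).append(key)
--
--     for label, keys in label_lookup.items():
--         count = 0
--         while f"*{label}*" in new_text and count < len(keys):
--             new_text = new_text.replace(f"*{label}*", keys[count], 1)
--             count += 1
--
--     return new_text
-- ===== SOURCE B (Python) =====
-- def convert_starred_to_placeholders(text, mapping):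
--     groups = {}
--     for key in mapping:
--         label = key.split("#")[0].strip("_")
--         groups.setdefault(label, []).append(key)
--
--     new_text = text
--     for label, keys in groups.items():
--         marker = "*" + label + "*"
--         first, *rest = new_text.split(marker)
--         pieces = [first]
--         for key, part in zip(keys, rest):
--             pieces.append(key)
--             pieces.append(part)
--         for part in rest[len(keys):]:
--             pieces.append(marker)
--             pieces.append(part)
--         new_text = "".join(pieces)
--     return new_text
-- ===== Notes on version B (the rewrite author's own statement) =====
-- stated objective: alternative
-- what changed: A's per-label inner loop (repeated full-text 'marker in text' membership scans plus text.replace(marker, key, 1), one rescan per consumed key) is replaced by a single text.split(marker) per label followed by one stitch pass that interleaves the keys with the pieces and rejoins remaining pieces with the marker.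
-- outside the precondition, e.g. on convert_starred_to_placeholders('**L**', {'L': 'x', 'L#2': 'y'}): A returns 'L#2', B returns '*L*'
import Mathlib
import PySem

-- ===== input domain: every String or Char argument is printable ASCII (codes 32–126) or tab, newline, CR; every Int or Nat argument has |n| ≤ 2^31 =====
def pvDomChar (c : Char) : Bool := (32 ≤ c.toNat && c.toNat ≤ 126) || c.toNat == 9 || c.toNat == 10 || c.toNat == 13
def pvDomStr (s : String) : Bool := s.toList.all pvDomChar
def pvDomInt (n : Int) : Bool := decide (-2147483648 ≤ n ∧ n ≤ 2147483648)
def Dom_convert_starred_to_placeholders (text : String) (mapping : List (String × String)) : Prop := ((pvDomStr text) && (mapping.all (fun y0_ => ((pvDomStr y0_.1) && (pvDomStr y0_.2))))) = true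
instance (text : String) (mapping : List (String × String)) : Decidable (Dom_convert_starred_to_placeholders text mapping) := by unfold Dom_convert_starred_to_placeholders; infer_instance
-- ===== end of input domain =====

-- B replaces A's per-label repeated `in`+replace(…,1) rescans by one split on the marker
-- and a single stitch pass (equal on Pre_; see Pre_'s comment for the excluded corner).

-- label = key.split("#")[0].strip("_")   (shared by both ports and by Pre_)
def pvLabel (k : List Char) : List Char :=
  PySem.Chars.stripChars ((PySem.Chars.splitOn k ['#']).headD []) ['_']

-- label_lookup building loop (identical first phase of both Pythons)
def pvGroups (mapping : List (String × String)) : PySem.Dict (List Char) (List (List Char)) :=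
  mapping.foldl (fun d p => d.modify (pvLabel p.1.toList) [] (fun l => l ++ [p.1.toList]))
    PySem.Dict.empty

-- ===== PORT A =====
-- t.replace(m, k, 1): hand port (PySem.Chars.replace has no count); exact: splice at first occurrence
def pvReplace1 (t m k : List Char) : List Char :=
  let i := PySem.Chars.find t m
  if i < 0 then t else t.take i.toNat ++ k ++ t.drop (i.toNat + m.length)

-- A's inner `while f"*{label}*" in new_text and count < len(keys)` loop (count ↦ consumed keys)
def pvSeqRep (m : List Char) : List Char → List (List Char) → List Char
  | t, [] => t
  | t, k :: rest => if PySem.Chars.isIn m t then pvSeqRep m (pvReplace1 t m k) rest else t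

def convert_starred_to_placeholders (text : String) (mapping : List (String × String)) : String :=
  let lookup := pvGroups mapping
  String.ofList (lookup.items.foldl (fun t lk => pvSeqRep ('*' :: lk.1 ++ ['*']) t lk.2) text.toList)

-- ===== PORT B =====
-- one split on the marker, then stitch: parts interleaved with keys, remaining separators restored
def pvSplitStitch (m : List Char) (keys : List (List Char)) (t : List Char) : List Char :=
  let parts := PySem.Chars.splitOn t m
  let first := parts.headD []
  let rest := parts.tail
  let pieces := (keys.zip rest).foldl (fun acc kp => acc ++ [kp.1, kp.2]) [first]
  let pieces2 := (rest.drop keys.length).foldl (fun acc p => acc ++ [m, p]) pieces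
  PySem.Chars.join [] pieces2

def convert_starred_to_placeholders_alt (text : String) (mapping : List (String × String)) : String :=
  let groups := pvGroups mapping
  String.ofList (groups.items.foldl (fun t lk => pvSplitStitch ('*' :: lk.1 ++ ['*']) lk.2 t) text.toList)

-- ===== PRECONDITION & SPEC =====
-- Pre_ excludes only the self-referential corner: text contains '*' while some mapping key
-- could itself be (part of) a marker — the key contains '*', or occurs inside its own label.
-- There a freshly inserted replacement key can combine with surrounding text into a new marker;
-- whether such re-inserted placeholder text is itself subject to further replacement is
-- unspecified for this task: A replaces it again, B leaves inserted keys alone, and either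
-- reading is defensible, so those inputs are left outside the claim.
def Pre_convert_starred_to_placeholders (text : String) (mapping : List (String × String)) : Prop :=
  ('*' ∉ text.toList) ∨
    (∀ p ∈ mapping, '*' ∉ p.1.toList ∧ '*' ∉ pvLabel p.1.toList ∧ ¬ (p.1.toList <:+: pvLabel p.1.toList))
instance (text : String) (mapping : List (String × String)) : Decidable (Pre_convert_starred_to_placeholders text mapping) := by
  unfold Pre_convert_starred_to_placeholders; infer_instance

def pvWitness_convert_starred_to_placeholders : String × (List (String × String)) :=
  ("a*L*b and *L* twice", [("_L_#1", "x"), ("_L_#2", "y")])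

def Spec_convert_starred_to_placeholders (text : String) (mapping : List (String × String)) (out : String) : Prop := out = convert_starred_to_placeholders_alt text mapping
instance (text : String) (mapping : List (String × String)) (out : String) : Decidable (Spec_convert_starred_to_placeholders text mapping out) := by unfold Spec_convert_starred_to_placeholders; infer_instance

-- ===== CLAIM (what is proved, stated in full; the proofs are below) =====
def Claim_equal_convert_starred_to_placeholders : Prop := ∀ (text : String) (mapping : List (String × String)), Dom_convert_starred_to_placeholders text mapping → Pre_convert_starred_to_placeholders text mapping → Spec_convert_starred_to_placeholders text mapping (convert_starred_to_placeholders text mapping)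

-- ===== LEMMAS AND PROOFS =====

-- recursive model of Python str.split(sep) for sep ≠ "" (pre = piece built so far)
def pvSplitF (m : List Char) (pre l : List Char) : List (List Char) :=
  if h : m ≠ [] ∧ m.isPrefixOf l ∧ l ≠ [] then
    pre :: pvSplitF m [] (l.drop m.length)
  else
    match l with
    | [] => [pre]
    | c :: rest => pvSplitF m (pre ++ [c]) rest
termination_by l.length
decreasing_by
  · have h1 : m.length ≥ 1 := by
      cases m with | nil => exact absurd rfl h.1 | cons a b => simp
    have h2 : l.length ≥ 1 := by
      cases l with | nil => exact absurd rfl h.2.2 | cons a b => simp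
    simp; omega
  · simp

-- model of B's stitching: interleave keys between pieces, restore remaining separators
def pvStitchR (m : List Char) : List (List Char) → List (List Char) → List Char
  | _, [] => []
  | _, [p] => p
  | [], p :: ps => p ++ m ++ pvStitchR m [] ps
  | k :: ks, p :: ps => p ++ k ++ pvStitchR m ks ps

lemma pvSplitF_ne_nil (m pre l : List Char) : pvSplitF m pre l ≠ [] := by
  fun_induction pvSplitF m pre l with
  | case1 => simp
  | case2 => simp
  | case3 _ _ _ _ ih => exact ih

-- PySem.Chars.splitOn.go agrees with the model
lemma pvSplitOn_go_eq (m : List Char) (hm : m ≠ []) :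
    ∀ fuel l cur acc, l.length < fuel →
      PySem.Chars.splitOn.go m fuel l cur acc = acc.reverse ++ pvSplitF m cur.reverse l := by
  intro fuel
  induction fuel with
  | zero => intro l cur acc h; omega
  | succ n ih =>
    intro l cur acc h
    cases l with
    | nil =>
      rw [pvSplitF]
      simp [PySem.Chars.splitOn.go, hm]
    | cons c rest =>
      by_cases hp : m.isPrefixOf (c :: rest)
      · have hml : 1 ≤ m.length := by cases m with | nil => exact absurd rfl hm | cons a b => simp
        rw [show PySem.Chars.splitOn.go m (n+1) (c :: rest) cur acc
              = PySem.Chars.splitOn.go m n (List.drop m.length (c :: rest)) [] (cur.reverse :: acc) by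
            simp [PySem.Chars.splitOn.go, hp]]
        rw [ih _ _ _ (by simp at h ⊢; omega)]
        rw [show pvSplitF m cur.reverse (c :: rest)
              = cur.reverse :: pvSplitF m [] (List.drop m.length (c :: rest)) by
            rw [pvSplitF, dif_pos ⟨hm, hp, by simp⟩]]
        simp
      · rw [show PySem.Chars.splitOn.go m (n+1) (c :: rest) cur acc
              = PySem.Chars.splitOn.go m n rest (c :: cur) acc by
            simp [PySem.Chars.splitOn.go, hp]]
        rw [ih _ _ _ (by simp at h ⊢; omega)]
        rw [show pvSplitF m cur.reverse (c :: rest)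
              = pvSplitF m (cur.reverse ++ [c]) rest by
            rw [pvSplitF, dif_neg (by simp [hp])]]
        simp

lemma pvSplitOn_eq (m l : List Char) (hm : m ≠ []) :
    PySem.Chars.splitOn l m = pvSplitF m [] l := by
  have := pvSplitOn_go_eq m hm (l.length + 1) l [] [] (by omega)
  simpa [PySem.Chars.splitOn] using this

-- uniqueness: find is THE first occurrence
lemma pvFind_eq_of (s m : List Char) (n : Nat) (h1 : m <+: s.drop n)
    (h2 : ∀ j < n, ¬ m <+: s.drop j) : PySem.Chars.find s m = (n : Int) := by
  have hinf : m <:+: s := List.infix_iff_prefix_suffix.mpr ⟨s.drop n, h1, List.drop_suffix n s⟩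
  have hnn : 0 ≤ PySem.Chars.find s m := (PySem.Chars.find_nonneg_iff s m).mpr hinf
  obtain ⟨hp, hmin⟩ := PySem.Chars.find_spec hnn
  rcases lt_trichotomy (PySem.Chars.find s m).toNat n with hlt | heq | hgt
  · exact absurd hp (h2 _ hlt)
  · omega
  · exact absurd h1 (hmin _ hgt)

lemma pvOcc_len {s m : List Char} {j : Nat} (hm : m ≠ []) (h : m <+: s.drop j) :
    j + m.length ≤ s.length := by
  have := h.length_le
  have hm1 : 1 ≤ m.length := by cases m with | nil => exact absurd rfl hm | cons a b => simp
  simp at this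
  omega

lemma pvOcc_getElem? {s m : List Char} {j : Nat} (h : m <+: s.drop j)
    {i : Nat} (hi : i < m.length) : s[j + i]? = some (m[i]) := by
  have h1 : (s.drop j)[i]? = some (m[i]) := by
    obtain ⟨t, ht⟩ := h
    rw [← ht, List.getElem?_append_left hi, List.getElem?_eq_getElem hi]
  rw [List.getElem?_drop] at h1
  exact h1

-- splitF when there is no occurrence
lemma pvSplitF_of_not_infix (m : List Char) (hm : m ≠ []) (pre l : List Char)
    (h : ¬ m <:+: l) : pvSplitF m pre l = [pre ++ l] := by
  fun_induction pvSplitF m pre l with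
  | case1 pre l hc ih =>
    exact absurd (List.infix_iff_prefix_suffix.mpr
      ⟨l, List.isPrefixOf_iff_prefix.mp hc.2.1, List.suffix_rfl⟩) h
  | case2 => simp
  | case3 pre hc c rest ih =>
    rw [ih (fun hinf => h ((List.infix_cons hinf)))]
    simp

-- splitF at the first occurrence
lemma pvSplitF_of_find_nat (m : List Char) (hm : m ≠ []) :
    ∀ (l : List Char) (n : Nat) (pre : List Char), PySem.Chars.find l m = (n : Int) →
    pvSplitF m pre l = (pre ++ l.take n) :: pvSplitF m [] (l.drop (n + m.length)) := by
  intro l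
  induction l with
  | nil =>
    intro n pre h
    have h0 : 0 ≤ PySem.Chars.find ([] : List Char) m := by rw [h]; positivity
    have := (PySem.Chars.find_spec h0).1
    simp at this
    exact absurd this hm
  | cons c rest ih =>
    intro n pre h
    have h0 : 0 ≤ PySem.Chars.find (c :: rest) m := by rw [h]; positivity
    obtain ⟨hp, hmin⟩ := PySem.Chars.find_spec h0
    have htn : (PySem.Chars.find (c :: rest) m).toNat = n := by omega
    rw [htn] at hp hmin
    by_cases hpf : m.isPrefixOf (c :: rest)
    · have hn0 : n = 0 := by
        by_contra hne
        exact hmin 0 (by omega) (by simpa using List.isPrefixOf_iff_prefix.mp hpf)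
      subst hn0
      rw [pvSplitF, dif_pos ⟨hm, hpf, by simp⟩]
      simp
    · have hnp : ¬ m <+: (c :: rest) := fun hh => hpf (List.isPrefixOf_iff_prefix.mpr hh)
      have hn1 : 1 ≤ n := by
        rcases Nat.eq_zero_or_pos n with h0' | h1
        · subst h0'; simp at hp; exact absurd hp hnp
        · exact h1
      obtain ⟨n', rfl⟩ : ∃ n', n = n' + 1 := ⟨n - 1, by omega⟩
      have hrest : PySem.Chars.find rest m = (n' : Int) := by
        apply pvFind_eq_of rest m n'
        · simpa [List.drop_succ_cons] using hp
        · intro j hj hcon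
          exact hmin (j + 1) (by omega) (by simpa [List.drop_succ_cons] using hcon)
      rw [pvSplitF, dif_neg (by simp [hpf])]
      simp only []
      rw [ih n' (pre ++ [c]) hrest]
      rw [show n' + 1 + m.length = (n' + m.length) + 1 by omega, List.drop_succ_cons]
      simp

lemma pvJoin_nil_flatten (xs : List (List Char)) : PySem.Chars.join [] xs = xs.flatten := by
  induction xs with
  | nil => exact PySem.Chars.join_nil []
  | cons a rest ih =>
    cases rest with
    | nil => rw [PySem.Chars.join_singleton]; simp
    | cons b t =>
      rw [PySem.Chars.join_cons_cons]
      simp [ih]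

lemma pvStitch_flat (m : List Char) :
    ∀ (keys rest : List (List Char)) (first : List Char),
      (([first] ++ (keys.zip rest).flatMap (fun kp => [kp.1, kp.2])
        ++ (rest.drop keys.length).flatMap (fun p => [m, p])).flatten)
        = pvStitchR m keys (first :: rest) := by
  intro keys rest
  induction rest generalizing keys with
  | nil =>
    intro first
    cases keys <;> simp [pvStitchR]
  | cons p rest' ih =>
    intro first
    cases keys with
    | nil =>
      have := ih [] p
      simp only [List.zip_nil_left, List.flatMap_nil, List.length_nil, List.drop_zero] at this ⊢
      simp only [pvStitchR]
      rw [← this]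
      simp
    | cons k ks =>
      have := ih ks p
      simp only [List.zip_cons_cons, List.flatMap_cons, List.length_cons,
        List.drop_succ_cons, pvStitchR] at this ⊢
      rw [← this]
      simp

-- B's inner body computes pvStitchR over the split
lemma pvSplitStitch_eq (m : List Char) (hm : m ≠ []) (keys : List (List Char)) (t : List Char) :
    pvSplitStitch m keys t = pvStitchR m keys (pvSplitF m [] t) := by
  obtain ⟨first, rest, hfr⟩ : ∃ p ps, pvSplitF m [] t = p :: ps := by
    cases hsf : pvSplitF m [] t with
    | nil => exact absurd hsf (pvSplitF_ne_nil m [] t)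
    | cons p ps => exact ⟨p, ps, rfl⟩
  unfold pvSplitStitch
  rw [pvSplitOn_eq m t hm, hfr]
  simp only [List.headD_cons, List.tail_cons]
  rw [show ∀ init, (keys.zip rest).foldl (fun acc kp => acc ++ [kp.1, kp.2]) init
        = init ++ (keys.zip rest).flatMap (fun kp => [kp.1, kp.2]) from
      fun init => PySem.List.foldl_append_eq_flatMap _ _ init]
  rw [PySem.List.foldl_append_eq_flatMap (fun p => [m, p])]
  rw [pvJoin_nil_flatten]
  exact pvStitch_flat m keys rest first

-- joining back with no keys left reproduces the string
lemma pvStitchR_nil_keys (m : List Char) (hm : m ≠ []) :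
    ∀ l pre, pvStitchR m [] (pvSplitF m pre l) = pre ++ l := by
  intro l pre
  fun_induction pvSplitF m pre l with
  | case1 pre l hc ih =>
    obtain ⟨p', ps', hps⟩ : ∃ p ps, pvSplitF m [] (l.drop m.length) = p :: ps := by
      cases hsf : pvSplitF m [] (l.drop m.length) with
      | nil => exact absurd hsf (pvSplitF_ne_nil m [] _)
      | cons p ps => exact ⟨p, ps, rfl⟩
    rw [hps]
    have hstep : pvStitchR m [] (pre :: p' :: ps') = pre ++ m ++ pvStitchR m [] (p' :: ps') := rfl
    rw [hstep, ← hps, ih]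
    obtain ⟨t, ht⟩ := List.isPrefixOf_iff_prefix.mp hc.2.1
    conv_rhs => rw [← ht]
    simp [← ht]
  | case2 pre hc => simp [pvStitchR]
  | case3 pre hc c rest ih =>
    rw [ih]
    simp

-- the no-crossing invariant: no occurrence of m starts strictly inside acc
def pvNoCross (m acc t : List Char) : Prop :=
  ∀ j < acc.length, ¬ m <+: (acc ++ t).drop j

lemma pvNoCross_find (m acc t : List Char) (hnc : pvNoCross m acc t)
    (h : 0 ≤ PySem.Chars.find t m) :
    PySem.Chars.find (acc ++ t) m = (acc.length : Int) + PySem.Chars.find t m := by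
  obtain ⟨hp, hmin⟩ := PySem.Chars.find_spec h
  have heq : PySem.Chars.find (acc ++ t) m
      = ((acc.length + (PySem.Chars.find t m).toNat : Nat) : Int) := by
    apply pvFind_eq_of
    · rw [List.drop_append, List.drop_eq_nil_of_le (by omega)]
      simpa [Nat.add_sub_cancel_left] using hp
    · intro j hj hcon
      rcases Nat.lt_or_ge j acc.length with hlt | hge
      · exact hnc j hlt hcon
      · rw [List.drop_append, List.drop_eq_nil_of_le (by omega)] at hcon
        simp at hcon
        exact hmin (j - acc.length) (by omega) hcon
  rw [heq]
  omega

lemma pvNoCross_isIn_false (m acc t : List Char) (hm : m ≠ []) (hnc : pvNoCross m acc t)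
    (h : PySem.Chars.find t m = -1) : PySem.Chars.isIn m (acc ++ t) = false := by
  rw [PySem.Chars.isIn_eq_false_iff]
  intro hinf
  have : PySem.Chars.isIn m (acc ++ t) = true := by
    rw [PySem.Chars.isIn_iff_infix]; exact hinf
  obtain ⟨j, hj⟩ := (PySem.Chars.exists_prefix_drop_iff_isIn m (acc ++ t)).mpr this
  rcases Nat.lt_or_ge j acc.length with hlt | hge
  · exact hnc j hlt hj
  · rw [List.drop_append, List.drop_eq_nil_of_le (by omega)] at hj
    simp at hj
    have hinf2 : m <:+: t := List.infix_iff_prefix_suffix.mpr ⟨_, hj, List.drop_suffix _ t⟩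
    exact (PySem.Chars.find_ne_neg_one_iff t m).mpr hinf2 h

-- the combinatorial heart: inserting a star-free key that is not part of its own label
-- cannot create or shift an occurrence of the marker
lemma pvNoCross_preserve (L k acc t : List Char) (hL : '*' ∉ L) (hk : '*' ∉ k)
    (hkL : ¬ k <:+: L) (hnc : pvNoCross ('*' :: L ++ ['*']) acc t) {i : Nat}
    (hocc : ('*' :: L ++ ['*']) <+: t.drop i)
    (hmin : ∀ j < i, ¬ ('*' :: L ++ ['*']) <+: t.drop j) :
    pvNoCross ('*' :: L ++ ['*']) (acc ++ t.take i ++ k)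
      (t.drop (i + ('*' :: L ++ ['*']).length)) := by
  set m : List Char := '*' :: L ++ ['*'] with hmdef
  have hm : m ≠ [] := by simp [hmdef]
  have hM : m.length = L.length + 2 := by simp [hmdef]
  have hk0 : k ≠ [] := fun h => hkL (by simp [h])
  have hiM : i + m.length ≤ t.length := pvOcc_len hm hocc
  intro j hj hpre
  have hti : (t.take i).length = i := by simp; omega
  have hjlen : j + m.length ≤ ((acc ++ t.take i ++ k) ++ t.drop (i + m.length)).length :=
    pvOcc_len hm hpre
  have hjub : j < acc.length + i + k.length := by simp [hti] at hj; omega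
  by_cases hcase : j + m.length ≤ acc.length + i
  -- the occurrence lies entirely inside acc ++ t.take i: it was an occurrence of the old string
  case pos =>
    have hmA : m <+: (acc ++ t.take i).drop j := by
      apply List.prefix_of_prefix_length_le hpre
      · exact List.IsPrefix.drop (by rw [List.append_assoc]; exact List.prefix_append _ _) j
      · simp [hti]; omega
    rcases Nat.lt_or_ge j acc.length with hlt | hge
    · apply hnc j hlt
      have hA'o : (acc ++ t.take i) <+: (acc ++ t) :=
        ⟨t.drop i, by rw [List.append_assoc, List.take_append_drop]⟩
      exact hmA.trans (List.IsPrefix.drop hA'o j)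
    · apply hmin (j - acc.length) (by omega)
      have h1 : (acc ++ t.take i).drop j = (t.take i).drop (j - acc.length) := by
        rw [List.drop_append, List.drop_eq_nil_of_le hge]
        simp
      rw [h1] at hmA
      exact hmA.trans (List.IsPrefix.drop (List.take_prefix i t) _)
  -- the occurrence overlaps the inserted key k: its end stars flank k, so k sits inside L
  case neg =>
    have hmem : ∀ q, q < k.length →
        ((acc ++ t.take i ++ k) ++ t.drop (i + m.length))[acc.length + i + q]? = k[q]? := by
      intro q hq
      rw [List.getElem?_append_left (by simp only [List.length_append, hti]; omega),
          List.getElem?_append_right (by simp only [List.length_append, hti]; omega)]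
      simp only [List.length_append, hti]
      congr 1
      omega
    have hstar_not : ∀ q, acc.length + i ≤ q → q < acc.length + i + k.length →
        ((acc ++ t.take i ++ k) ++ t.drop (i + m.length))[q]? ≠ some '*' := by
      intro q h1 h2 hq
      have hx := hmem (q - (acc.length + i)) (by omega)
      rw [show acc.length + i + (q - (acc.length + i)) = q by omega] at hx
      rw [hx] at hq
      exact hk (List.mem_of_getElem? hq)
    -- both stars of the occurrence lie outside k, so k sits strictly inside L
    have hocc0 : ((acc ++ t.take i ++ k) ++ t.drop (i + m.length))[j]? = some '*' := by
      have hx := pvOcc_getElem? hpre (i := 0) (by simp [hmdef])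
      simpa [hmdef] using hx
    have hjlt : j < acc.length + i := by
      by_contra hge
      exact hstar_not j (by omega) (by omega) hocc0
    have hoccE : ((acc ++ t.take i ++ k) ++ t.drop (i + m.length))[j + (L.length + 1)]? = some '*' := by
      have hoff : L.length + 1 < m.length := by omega
      have hx := pvOcc_getElem? hpre (i := L.length + 1) hoff
      have hml : (m[L.length + 1]'hoff) = '*' := by
        have : m[L.length + 1]? = some '*' := by
          simp [hmdef]
        rw [List.getElem?_eq_getElem hoff] at this
        exact Option.some.inj this
      rw [hml] at hx
      exact hx
    have hekb : acc.length + i + k.length ≤ j + L.length + 1 := by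
      by_contra hlt2
      exact hstar_not (j + (L.length + 1)) (by omega) (by omega) hoccE
    have hdb : (acc.length + i - j - 1) + k.length ≤ L.length := by omega
    have hkeq : k = (L.drop (acc.length + i - j - 1)).take k.length := by
      apply List.ext_getElem?
      intro idx
      rcases Nat.lt_or_ge idx k.length with hlt | hge2
      · have hoff2 : (acc.length + i - j - 1) + idx + 1 < m.length := by omega
        have hx := pvOcc_getElem? hpre (i := (acc.length + i - j - 1) + idx + 1) hoff2
        rw [show j + ((acc.length + i - j - 1) + idx + 1) = acc.length + i + idx by omega] at hx
        rw [hmem idx hlt] at hx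
        have hmval : m[(acc.length + i - j - 1) + idx + 1]? = L[(acc.length + i - j - 1) + idx]? := by
          have e1 : (('*' :: L) ++ ['*'] : List Char)[(acc.length + i - j - 1) + idx + 1]?
              = ('*' :: L)[(acc.length + i - j - 1) + idx + 1]? :=
            List.getElem?_append_left (by simp; omega)
          rw [hmdef, e1, List.getElem?_cons_succ]
        rw [List.getElem?_eq_getElem hoff2] at hmval
        rw [hx, hmval]
        rw [List.getElem?_take_of_lt hlt, List.getElem?_drop]
      · rw [List.getElem?_eq_none (by omega), List.getElem?_eq_none (by simp; omega)]
    have hpref : k <+: L.drop (acc.length + i - j - 1) := by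
      conv_lhs => rw [hkeq]
      exact List.take_prefix _ _
    exact hkL (List.infix_iff_prefix_suffix.mpr ⟨_, hpref, List.drop_suffix _ L⟩)


-- main per-label lemma: A's sequential replace loop = split-and-stitch
lemma pvSeqRep_eq (L : List Char) (hL : '*' ∉ L) :
    ∀ (ks : List (List Char)), (∀ k ∈ ks, '*' ∉ k ∧ ¬ k <:+: L) →
    ∀ t acc, pvNoCross ('*' :: L ++ ['*']) acc t →
      pvSeqRep ('*' :: L ++ ['*']) (acc ++ t) ks =
        acc ++ pvStitchR ('*' :: L ++ ['*']) ks (pvSplitF ('*' :: L ++ ['*']) [] t) := by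
  set m : List Char := '*' :: L ++ ['*'] with hmdef
  have hm : m ≠ [] := by simp [hmdef]
  intro ks
  induction ks with
  | nil =>
    intro _ t acc _
    show acc ++ t = acc ++ pvStitchR m [] (pvSplitF m [] t)
    rw [pvStitchR_nil_keys m hm t []]
    simp
  | cons k rest ih =>
    intro hks t acc hnc
    obtain ⟨hk, hkL⟩ := hks k List.mem_cons_self
    have hrest : ∀ k' ∈ rest, '*' ∉ k' ∧ ¬ k' <:+: L :=
      fun k' h => hks k' (List.mem_cons_of_mem _ h)
    rcases Int.lt_or_le (PySem.Chars.find t m) 0 with hneg | hpos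
    · have hfm1 : PySem.Chars.find t m = -1 := by
        have := PySem.Chars.neg_one_le_find t m
        omega
      have hIn : PySem.Chars.isIn m (acc ++ t) = false :=
        pvNoCross_isIn_false m acc t hm hnc hfm1
      unfold pvSeqRep
      rw [hIn]
      simp only [Bool.false_eq_true, if_false]
      rw [pvSplitF_of_not_infix m hm [] t ((PySem.Chars.find_eq_neg_one_iff t m).mp hfm1)]
      rfl
    · obtain ⟨hocc, hmin⟩ := PySem.Chars.find_spec hpos
      have hfacc := pvNoCross_find m acc t hnc hpos
      have hIn : PySem.Chars.isIn m (acc ++ t) = true := by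
        rw [PySem.Chars.isIn_iff_infix, ← PySem.Chars.find_nonneg_iff]
        omega
      have hiM : (PySem.Chars.find t m).toNat + m.length ≤ t.length :=
        pvOcc_len hm hocc
      have hrepl : pvReplace1 (acc ++ t) m k
          = (acc ++ t.take (PySem.Chars.find t m).toNat ++ k)
              ++ t.drop ((PySem.Chars.find t m).toNat + m.length) := by
        unfold pvReplace1
        rw [hfacc]
        rw [if_neg (by omega)]
        have htake : (acc ++ t).take (((acc.length : Int) + PySem.Chars.find t m).toNat)
            = acc ++ t.take (PySem.Chars.find t m).toNat := by
          rw [show ((acc.length : Int) + PySem.Chars.find t m).toNat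
                = acc.length + (PySem.Chars.find t m).toNat by omega]
          rw [List.take_append, List.take_of_length_le (by omega)]
          simp
        have hdrop : (acc ++ t).drop (((acc.length : Int) + PySem.Chars.find t m).toNat + m.length)
            = t.drop ((PySem.Chars.find t m).toNat + m.length) := by
          rw [List.drop_append, List.drop_eq_nil_of_le (by omega)]
          simp only [List.nil_append]
          congr 1
          omega
        rw [htake, hdrop]
      have hnc' := pvNoCross_preserve L k acc t hL hk hkL hnc hocc hmin
      have hih := ih hrest (t.drop ((PySem.Chars.find t m).toNat + m.length))
        (acc ++ t.take (PySem.Chars.find t m).toNat ++ k) hnc'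
      unfold pvSeqRep
      rw [hIn]
      simp only [if_true]
      rw [hrepl, hih]
      rw [pvSplitF_of_find_nat m hm t (PySem.Chars.find t m).toNat []
        (by omega)]
      obtain ⟨p', ps', hps⟩ : ∃ p ps,
          pvSplitF m [] (t.drop ((PySem.Chars.find t m).toNat + m.length)) = p :: ps := by
        cases hsf : pvSplitF m [] (t.drop ((PySem.Chars.find t m).toNat + m.length)) with
        | nil => exact absurd hsf (pvSplitF_ne_nil m [] _)
        | cons p ps => exact ⟨p, ps, rfl⟩
      rw [hps]
      show (acc ++ t.take (PySem.Chars.find t m).toNat ++ k) ++ pvStitchR m rest (p' :: ps')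
          = acc ++ pvStitchR m (k :: rest) (([] ++ t.take (PySem.Chars.find t m).toNat) :: p' :: ps')
      simp [pvStitchR, List.append_assoc]

-- star-free strings are untouched by both inner bodies
lemma pvSeqRep_starfree (L t : List Char) (ks : List (List Char)) (ht : '*' ∉ t) :
    pvSeqRep ('*' :: L ++ ['*']) t ks = t := by
  cases ks with
  | nil => rfl
  | cons k rest =>
    have hfalse : PySem.Chars.isIn ('*' :: L ++ ['*']) t = false := by
      rw [PySem.Chars.isIn_eq_false_iff]
      intro hinf
      exact ht (hinf.subset (by simp))
    unfold pvSeqRep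
    rw [hfalse]
    simp

lemma pvSplitStitch_starfree (L t : List Char) (ks : List (List Char)) (ht : '*' ∉ t) :
    pvSplitStitch ('*' :: L ++ ['*']) ks t = t := by
  rw [pvSplitStitch_eq _ (by simp) ks t]
  have hni : ¬ ('*' :: L ++ ['*']) <:+: t := by
    intro hinf
    exact ht (hinf.subset (by simp))
  rw [pvSplitF_of_not_infix _ (by simp) [] t hni]
  cases ks <;> rfl

-- every value list in pvGroups consists of mapping keys with that label
lemma pvGroups_mem (mapping : List (String × String)) :
    ∀ lk ∈ (pvGroups mapping).items, ∀ k ∈ lk.2,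
      pvLabel k = lk.1 ∧ ∃ p ∈ mapping, p.1.toList = k := by
  have h1 : pvGroups mapping
      = (mapping.map (fun p => (pvLabel p.1.toList, p.1.toList))).foldl
          (fun d q => d.modify q.1 [] (fun l => l ++ [q.2])) PySem.Dict.empty := by
    rw [List.foldl_map]
    rfl
  have hempty : (PySem.Dict.empty : PySem.Dict (List Char) (List (List Char))).keys.Nodup := by
    simp [PySem.Dict.empty, PySem.Dict.keys]
  have hnodup : (pvGroups mapping).keys.Nodup := by
    rw [h1]
    exact PySem.Dict.nodup_keys_foldl_modify_key _
      (fun (q : List Char × List Char) => q.1) []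
      (fun _ (q : List Char × List Char) => (fun l => l ++ [q.2])) _ hempty
  have hgetD : ∀ c, (pvGroups mapping).getD c []
      = (((mapping.map (fun p => (pvLabel p.1.toList, p.1.toList))).filter
          (fun (q : List Char × List Char) => q.1 == c)).map (fun (q : List Char × List Char) => q.2)) := by
    intro c
    rw [h1, PySem.Dict.getD_foldl_modify_append]
    simp [PySem.Dict.empty, PySem.Dict.getD, PySem.Dict.get?]
  intro lk hlk k hk
  rw [PySem.Dict.items_eq_map_keys _ hnodup []] at hlk
  obtain ⟨c, hc, rfl⟩ := List.mem_map.mp hlk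
  simp only [hgetD c] at hk
  obtain ⟨q, hqf, rfl⟩ := List.mem_map.mp hk
  obtain ⟨hqm, hqc⟩ := List.mem_filter.mp hqf
  obtain ⟨p, hpm, rfl⟩ := List.mem_map.mp hqm
  refine ⟨by simpa using hqc, p, hpm, rfl⟩

-- ===== VERDICT (by name: the statement is the Claim_ definition above) =====
theorem convert_starred_to_placeholders_spec : Claim_equal_convert_starred_to_placeholders := by
  intro text mapping hdom hpre
  unfold Spec_convert_starred_to_placeholders
  unfold convert_starred_to_placeholders convert_starred_to_placeholders_alt
  simp only []
  congr 1
  rcases hpre with hstar | hkeys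
  · -- no '*' in the text: no marker can ever match; both folds are the identity
    have hgen : ∀ (items : List (List Char × List (List Char))) (t : List Char), '*' ∉ t →
        items.foldl (fun t lk => pvSeqRep ('*' :: lk.1 ++ ['*']) t lk.2) t
          = items.foldl (fun t lk => pvSplitStitch ('*' :: lk.1 ++ ['*']) lk.2 t) t := by
      intro items
      induction items with
      | nil => intro t ht; rfl
      | cons lk rest ih =>
        intro t ht
        simp only [List.foldl_cons]
        rw [pvSeqRep_starfree lk.1 t lk.2 ht, pvSplitStitch_starfree lk.1 t lk.2 ht]
        exact ih t ht
    exact hgen _ _ hstar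
  · apply PySem.List.foldl_congr_mem
    intro t lk hlk
    have hmem0 := pvGroups_mem mapping lk hlk
    cases hks : lk.2 with
    | nil =>
      show pvSeqRep ('*' :: lk.1 ++ ['*']) t [] = pvSplitStitch ('*' :: lk.1 ++ ['*']) [] t
      rw [pvSplitStitch_eq _ (by simp) [] t]
      show t = pvStitchR _ [] (pvSplitF _ [] t)
      rw [pvStitchR_nil_keys _ (by simp) t []]
      simp
    | cons k0 krest =>
      have hL : '*' ∉ lk.1 := by
        obtain ⟨hlab, p, hp, hpk⟩ := hmem0 k0 (by rw [hks]; exact List.mem_cons_self)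
        have h2 := (hkeys p hp).2.1
        rw [hpk, hlab] at h2
        exact h2
      have hcond : ∀ k ∈ lk.2, '*' ∉ k ∧ ¬ k <:+: lk.1 := by
        intro k hkmem
        obtain ⟨hlab, p, hp, hpk⟩ := hmem0 k hkmem
        obtain ⟨h1, _, h3⟩ := hkeys p hp
        rw [hpk] at h1 h3
        rw [hlab] at h3
        exact ⟨h1, h3⟩
      have hmain := pvSeqRep_eq lk.1 hL lk.2 hcond t []
        (by intro j hj; simp at hj)
      simp only [List.nil_append] at hmain
      rw [hks] at hmain
      rw [hmain, pvSplitStitch_eq _ (by simp)]
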